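-- pv_equiv track=rewrite | github.com/ZagorcLuka/Programiranje-fmf | SeminarskaPRO1/dyslectionary.py | uredimo
-- ===== SOURCE A (Python) =====
-- def uredimo(skupine):
--     "uredi obrnjene besede po abecedi"
--
--     for skupina in skupine:
--         obratno = []
--         for beseda in skupina:       #gremo skozi vse skupine
--             fliped = list(beseda)    #besede razdelimo po črkah
--             fliped.reverse()         #obrnemo vrstni red crk,
--             fliped = "".join(fliped) #crke združimo nazaj v besedo
--
--             obratno.append(fliped)#obrnjeno besedo shranimo v tabelo
--         obratno.sort()            #vse obrnjene besede uredimo po abecednem vrstnem redu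
--
--         for i in range(len(skupina)):    #besede ponovno obrnemo in jih shranimo
--             re_fliped = list(obratno[i]) #nazaj v podtabelo "skupina" v urejenem
--             re_fliped.reverse()          #vrstnem redu obrnjenih besed
--             re_fliped = "".join(re_fliped)
--             skupina[i] = re_fliped
--     return skupine
-- ===== SOURCE B (Python) =====
-- def _rev_le(a, b):
--     "True iff a read backwards is <= b read backwards (code-point order)"
--     for x, y in zip(reversed(a), reversed(b)):
--         if x != y:
--             return x < y
--     return len(a) <= len(b)
--
-- def _merge(l, r):
--     "merge two runs already ordered by their reversals"
--     out = []
--     i = j = 0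
--     while i < len(l) and j < len(r):
--         if _rev_le(l[i], r[j]):
--             out.append(l[i])
--             i += 1
--         else:
--             out.append(r[j])
--             j += 1
--     out.extend(l[i:])
--     out.extend(r[j:])
--     return out
--
-- def _msort(besede):
--     "mergesort by the right-to-left comparator; no reversed string is ever built"
--     if len(besede) <= 1:
--         return list(besede)
--     mid = len(besede) // 2
--     return _merge(_msort(besede[:mid]), _msort(besede[mid:]))
--
-- def uredimo(skupine):
--     "uredi obrnjene besede po abecedi"
--     for skupina in skupine:
--         skupina[:] = _msort(skupina)
--     return skupine
-- ===== Notes on version B (the rewrite author's own statement) =====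
-- stated objective: alternative
-- what changed: Replaces A's decorate/sort/undecorate pipeline (materialise a reversed copy of every word, sort that auxiliary list, then re-reverse each entry back by index) with a hand-written mergesort whose comparator walks the two words right-to-left character by character, so no reversed string is ever built.
import Mathlib
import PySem

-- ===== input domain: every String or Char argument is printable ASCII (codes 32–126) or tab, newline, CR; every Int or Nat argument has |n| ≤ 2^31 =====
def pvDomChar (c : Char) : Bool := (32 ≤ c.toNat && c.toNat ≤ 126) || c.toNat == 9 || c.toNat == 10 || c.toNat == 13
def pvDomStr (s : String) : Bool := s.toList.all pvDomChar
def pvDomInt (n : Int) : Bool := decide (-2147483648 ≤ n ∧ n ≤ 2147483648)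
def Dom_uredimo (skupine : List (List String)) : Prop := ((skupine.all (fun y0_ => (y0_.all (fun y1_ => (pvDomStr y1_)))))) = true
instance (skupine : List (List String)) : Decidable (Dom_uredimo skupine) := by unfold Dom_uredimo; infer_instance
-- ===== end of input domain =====

-- B replaces A's decorate/sort/undecorate pipeline by a hand-written mergesort whose comparator walks the
-- two words right-to-left, so no reversed string is ever materialised (alternative algorithm).
-- Both Pythons mutate the argument's inner lists in place; the equivalence proved here is about the
-- RETURN value.

-- ===== PORT A =====
-- list(beseda); .reverse(); "".join(...)  — reverse the characters of a word
def pvRevA (beseda : String) : String := String.ofList beseda.toList.reverse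

def uredimo (skupine : List (List String)) : List (List String) :=
  skupine.map (fun skupina =>
    -- obratno = []; for beseda in skupina: obratno.append(rev beseda)
    let obratno := skupina.foldl (fun acc beseda => acc ++ [pvRevA beseda]) []
    -- obratno.sort()
    let obratno := PySem.List.sorted obratno (fun x => x)
    -- for i in range(len(skupina)): skupina[i] = rev(obratno[i])
    -- (each slot is overwritten once, from obratno only: ported as a map over range(len(skupina)))
    (PySem.List.pyRange 0 (skupina.length : Int) 1).map
      (fun i => pvRevA (PySem.List.pyGetD obratno i "")))

-- ===== PORT B =====
-- _rev_le: for x, y in zip(reversed(a), reversed(b)): if x != y: return x < y — then len(a) <= len(b)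
def pvRevLeGo (ps : List (Char × Char)) (d : Bool) : Bool :=
  match ps with
  | [] => d
  | (x, y) :: rest => if x ≠ y then decide (x < y) else pvRevLeGo rest d

def pvRevLe (a b : String) : Bool :=
  pvRevLeGo (a.toList.reverse.zip b.toList.reverse) (decide (a.toList.length ≤ b.toList.length))

-- _merge: while i < len(l) and j < len(r): take the _rev_le-smaller head; then the leftovers
def pvMerge (l r : List String) : List String :=
  match l, r with
  | [], r => r
  | a :: l', [] => a :: l'
  | a :: l', b :: r' =>
    if pvRevLe a b then a :: pvMerge l' (b :: r')
    else b :: pvMerge (a :: l') r'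

-- _msort: if len <= 1 return a copy; mid = len // 2 (floordiv of nonnegatives is Nat division,
-- PySem.Int.floordiv_natCast); besede[:mid] / besede[mid:] are take/drop (PySem.List.slice_to_natCast /
-- slice_from_natCast)
def pvMsort (besede : List String) : List String :=
  if besede.length ≤ 1 then besede
  else
    pvMerge (pvMsort (besede.take (besede.length / 2)))
            (pvMsort (besede.drop (besede.length / 2)))
termination_by besede.length
decreasing_by
  · simp only [List.length_take]; omega
  · simp only [List.length_drop]; omega

def uredimo_alt (skupine : List (List String)) : List (List String) :=
  skupine.map (fun skupina =>
    -- skupina[:] = _msort(skupina)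
    pvMsort skupina)

-- ===== PRECONDITION & SPEC =====
def Spec_uredimo (skupine : List (List String)) (out : List (List String)) : Prop := out = uredimo_alt skupine
instance (skupine : List (List String)) (out : List (List String)) : Decidable (Spec_uredimo skupine out) := by unfold Spec_uredimo; infer_instance

-- ===== CLAIM (what is proved, stated in full; the proofs are below) =====
def Claim_equal_uredimo : Prop := ∀ (skupine : List (List String)), Dom_uredimo skupine → Spec_uredimo skupine (uredimo skupine)

-- ===== LEMMAS AND PROOFS =====

theorem pvRevA_rev (w : String) : pvRevA (pvRevA w) = w := by
  simp [pvRevA]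

-- the right-to-left walk computes "reversed a <= reversed b"
theorem revLeGo_eq (xs ys : List Char) :
    pvRevLeGo (xs.zip ys) (decide (xs.length ≤ ys.length))
      = !decide (String.ofList ys < String.ofList xs) := by
  induction xs generalizing ys with
  | nil =>
      cases ys <;> simp [pvRevLeGo, String.lt_iff_toList_lt, List.not_lt_nil]
  | cons x xs ih =>
      cases ys with
      | nil => simp [pvRevLeGo, String.lt_iff_toList_lt, List.nil_lt_cons]
      | cons y ys =>
          simp only [List.zip_cons_cons, pvRevLeGo, List.length_cons]
          by_cases hxy : x = y
          · subst hxy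
            simp only [ne_eq, not_true_eq_false, if_false, Nat.add_le_add_iff_right]
            rw [ih ys]
            simp [String.lt_iff_toList_lt]
          · simp only [ne_eq, hxy, not_false_eq_true, if_true]
            have hlt : (String.ofList (y :: ys) < String.ofList (x :: xs)) ↔ y < x := by
              simp [String.lt_iff_toList_lt, List.cons_lt_cons_iff, Ne.symm hxy]
            rw [show (decide (String.ofList (y :: ys) < String.ofList (x :: xs))) = decide (y < x) by
                  simp [hlt]]
            rcases lt_trichotomy x y with h | h | h
            · simp [h, not_lt_of_gt h]
            · exact absurd h hxy
            · simp [h, not_lt_of_gt h]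

theorem revLe_iff (z w : String) :
    pvRevLe z w = !decide (pvRevA w < pvRevA z) := by
  unfold pvRevLe pvRevA
  have := revLeGo_eq z.toList.reverse w.toList.reverse
  simpa using this

theorem pvRevA_injective : Function.Injective pvRevA := by
  intro a b h
  have := congrArg pvRevA h
  rwa [pvRevA_rev, pvRevA_rev] at this

theorem revLe_trans (a b c : String) (h1 : pvRevLe a b = true) (h2 : pvRevLe b c = true) :
    pvRevLe a c = true := by
  rw [revLe_iff] at h1 h2 ⊢
  simp only [Bool.not_eq_eq_eq_not, Bool.not_true, decide_eq_false_iff_not, not_lt] at h1 h2 ⊢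
  exact le_trans h1 h2

theorem revLe_total (a b : String) : (pvRevLe a b || pvRevLe b a) = true := by
  rw [revLe_iff, revLe_iff]
  rcases le_total (pvRevA a) (pvRevA b) with h | h
  · simp [not_lt_of_ge h]
  · simp [not_lt_of_ge h]

theorem pvMerge_eq_merge (l r : List String) :
    pvMerge l r = List.merge l r (fun a b => pvRevLe a b) := by
  fun_induction pvMerge <;> simp_all [List.nil_merge]

theorem msort_perm (g : List String) : (pvMsort g).Perm g := by
  fun_induction pvMsort with
  | case1 g h => exact List.Perm.refl g
  | case2 g h ih1 ih2 =>
      rw [pvMerge_eq_merge]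
      have h3 : (g.take (g.length / 2) ++ g.drop (g.length / 2)).Perm g := by
        rw [List.take_append_drop]
      exact (List.merge_perm_append _).trans ((ih1.append ih2).trans h3)

theorem msort_pairwise (g : List String) :
    (pvMsort g).Pairwise (fun a b => pvRevLe a b = true) := by
  fun_induction pvMsort with
  | case1 g h =>
      match g, h with
      | [], _ => exact List.Pairwise.nil
      | [a], _ => exact List.pairwise_singleton _ a
  | case2 g h ih1 ih2 =>
      rw [pvMerge_eq_merge]
      exact List.pairwise_merge revLe_trans revLe_total _ _ ih1 ih2

-- B's per-group mergesort is sorted(skupina, key = reversed word)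
theorem group_alt_eq (g : List String) :
    pvMsort g = PySem.List.sorted g (fun w => String.ofList w.toList.reverse) := by
  have hpair : ∀ (l : List String), l.Pairwise (fun a b => pvRevLe a b = true) ↔
      l.Pairwise (fun a b => pvRevA a ≤ pvRevA b) := by
    intro l
    apply List.Pairwise.iff
    intro a b
    rw [revLe_iff]
    simp [not_lt]
  refine PySem.List.eq_of_perm_of_pairwise_le_of_injective
    (key := fun w => String.ofList w.toList.reverse) pvRevA_injective
    ((msort_perm g).trans (PySem.List.sorted_perm g _ false).symm)
    ((hpair _).mp (msort_pairwise g)) ?_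
  exact PySem.List.sorted_pairwise g _

-- inserting a reversed word into a list of reversed words = reversing the key-based insertion
theorem insertBy_map_rev (x : String) (zs : List String) :
    PySem.List.insertBy (fun a b => decide (a < b)) (pvRevA x) (zs.map pvRevA)
      = (PySem.List.insertBy (fun a b => decide (pvRevA a < pvRevA b)) x zs).map pvRevA := by
  induction zs with
  | nil => simp [PySem.List.insertBy]
  | cons z zs ih =>
      simp only [List.map_cons, PySem.List.insertBy]
      split_ifs with h
      · rfl
      · rw [ih]; rfl

theorem foldl_insertBy_map_rev (g : List String) (bcc : List String) :
    g.foldl (fun acc w => PySem.List.insertBy (fun a b => decide (a < b)) (pvRevA w) acc)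
        (bcc.map pvRevA)
      = (g.foldl (fun acc w => PySem.List.insertBy (fun a b => decide (pvRevA a < pvRevA b)) w acc)
          bcc).map pvRevA := by
  induction g generalizing bcc with
  | nil => rfl
  | cons w g ih =>
      simp only [List.foldl_cons, insertBy_map_rev]
      exact ih _

-- per-group equality: A's decorate/sort/undecorate equals sorted(skupina, key = reversed word)
theorem group_eq (g : List String) :
    (PySem.List.pyRange 0 (g.length : Int) 1).map
        (fun i => pvRevA (PySem.List.pyGetD
          (PySem.List.sorted (g.foldl (fun acc b => acc ++ [pvRevA b]) []) (fun x => x)) i ""))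
      = PySem.List.sorted g (fun w => String.ofList w.toList.reverse) := by
  have hdec : g.foldl (fun acc b => acc ++ [pvRevA b]) [] = g.map pvRevA :=
    by simpa using PySem.List.foldl_append_singleton_eq_map pvRevA g []
  rw [hdec]
  have hlen : g.length = (PySem.List.sorted (g.map pvRevA) (fun x => x)).length := by
    simp [PySem.List.length_sorted]
  rw [hlen]
  have hrange : (PySem.List.pyRange 0 ((PySem.List.sorted (g.map pvRevA) (fun x => x)).length : Int) 1).map
      (fun i => pvRevA (PySem.List.pyGetD (PySem.List.sorted (g.map pvRevA) (fun x => x)) i ""))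
      = ((PySem.List.pyRange 0 ((PySem.List.sorted (g.map pvRevA) (fun x => x)).length : Int) 1).map
          (fun i => PySem.List.pyGetD (PySem.List.sorted (g.map pvRevA) (fun x => x)) i "")).map pvRevA := by
    simp [List.map_map]
  rw [hrange, PySem.List.map_pyGetD_pyRange_zero']
  rw [PySem.List.sorted_eq_foldl_insertBy (g.map pvRevA) (fun x => x),
      PySem.List.sorted_eq_foldl_insertBy g (fun w => String.ofList w.toList.reverse)]
  have hkey : (fun a b => decide (String.ofList a.toList.reverse < String.ofList b.toList.reverse))
      = (fun a b => decide (pvRevA a < pvRevA b)) := rfl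
  rw [hkey, List.foldl_map]
  have hmapid : ∀ l : List String, l.map (pvRevA ∘ pvRevA) = l := by
    intro l
    simp [Function.comp_def, pvRevA_rev]
  have := foldl_insertBy_map_rev g []
  simp only [List.map_nil] at this
  rw [this, List.map_map, hmapid]

-- ===== VERDICT (by name: the statement is the Claim_ definition above) =====
theorem uredimo_spec : Claim_equal_uredimo := by
  intro skupine _
  unfold Spec_uredimo uredimo uredimo_alt
  refine List.map_congr_left (fun g _ => ?_)
  rw [group_eq g, group_alt_eq g]
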